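-- pv_equiv track=rewrite | github.com/laukevin/nano-math | scripts/train/sft_lora.py | pack_sequences
-- ===== SOURCE A (Python) =====
-- def pack_sequences(
--     tokenized_samples: list[dict], max_seq_len: int, eos_token_id: int
-- ) -> list[dict]:
--     """Pack multiple tokenized samples into sequences of max_seq_len."""
--     packed = []
--     current_ids: list[int] = []
--     current_labels: list[int] = []
--
--     for sample in tokenized_samples:
--         ids = sample["input_ids"]
--         labels = sample["labels"]
--
--         # If adding this sample would exceed max_seq_len, flush current
--         if current_ids and len(current_ids) + len(ids) + 1 > max_seq_len:  # +1 for EOS separator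
--             pad_len = max_seq_len - len(current_ids)
--             packed.append({
--                 "input_ids": current_ids + [eos_token_id] * pad_len,
--                 "attention_mask": [1] * len(current_ids) + [0] * pad_len,
--                 "labels": current_labels + [-100] * pad_len,
--             })
--             current_ids = []
--             current_labels = []
--
--         # Add EOS separator between samples
--         if current_ids:
--             current_ids.append(eos_token_id)
--             current_labels.append(-100)
--
--         current_ids.extend(ids)
--         current_labels.extend(labels)
--
--     # Flush remaining
--     if current_ids:
--         pad_len = max_seq_len - len(current_ids)
--         packed.append({
--             "input_ids": current_ids + [eos_token_id] * pad_len,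
--             "attention_mask": [1] * len(current_ids) + [0] * pad_len,
--             "labels": current_labels + [-100] * pad_len,
--         })
--
--     return packed
-- ===== SOURCE B (Python) =====
-- def pack_sequences(tokenized_samples, max_seq_len, eos_token_id):
--     """Pack multiple tokenized samples into sequences of max_seq_len.
--
--     Two-pass version: first group samples into bins by a running packed
--     length, then render each bin into one padded record.
--     """
--     # Pass 1: decide the grouping only (no content is built yet).
--     bins = []
--     group = []
--     running = 0
--     for sample in tokenized_samples:
--         n = len(sample["input_ids"])
--         if running > 0 and running + n + 1 > max_seq_len:
--             bins.append(group)
--             group = []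
--             running = 0
--         group.append(sample)
--         running += n + (1 if running > 0 else 0)
--     bins.append(group)
--
--     # Pass 2: render each bin (join with EOS/-100 separators, then pad).
--     packed = []
--     for group in bins:
--         ids = []
--         labels = []
--         for sample in group:
--             if ids:
--                 ids.append(eos_token_id)
--                 labels.append(-100)
--             ids += sample["input_ids"]
--             labels += sample["labels"]
--         if not ids:
--             continue
--         pad = max(max_seq_len - len(ids), 0)
--         packed.append({
--             "input_ids": ids + [eos_token_id] * pad,
--             "attention_mask": [1] * len(ids) + [0] * pad,
--             "labels": labels + [-100] * pad,
--         })
--     return packed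
-- ===== Notes on version B (the rewrite author's own statement) =====
-- stated objective: alternative
-- what changed: B splits A's single stateful loop into two passes: a grouping pass that only partitions the samples into bins by a running length counter, and a rendering pass that joins each bin with EOS/-100 separators and pads it.
import Mathlib
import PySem

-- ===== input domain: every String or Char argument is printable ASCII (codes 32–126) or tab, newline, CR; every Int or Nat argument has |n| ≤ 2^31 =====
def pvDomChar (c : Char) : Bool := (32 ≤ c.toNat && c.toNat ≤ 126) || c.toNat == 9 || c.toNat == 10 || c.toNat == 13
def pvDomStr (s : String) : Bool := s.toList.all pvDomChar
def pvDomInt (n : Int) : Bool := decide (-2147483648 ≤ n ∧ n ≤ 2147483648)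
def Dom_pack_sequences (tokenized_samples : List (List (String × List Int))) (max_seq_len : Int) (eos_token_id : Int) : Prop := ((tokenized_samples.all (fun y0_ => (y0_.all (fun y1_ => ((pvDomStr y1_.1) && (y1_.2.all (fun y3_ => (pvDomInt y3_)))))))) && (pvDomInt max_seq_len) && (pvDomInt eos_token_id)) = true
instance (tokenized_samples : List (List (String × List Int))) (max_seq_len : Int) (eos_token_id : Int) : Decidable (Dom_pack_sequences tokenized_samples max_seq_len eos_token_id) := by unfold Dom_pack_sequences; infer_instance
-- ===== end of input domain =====

-- B replaces A's single stateful loop by two passes — group samples into bins, then render each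
-- bin — a different decomposition of the same packing task (same cost); equivalence of the RETURN
-- values is what is proved.

-- shared tiny helper: Python dict access sample[k] on an association list (first match;
-- the `none` case is a KeyError in Python and is excluded by Pre_, where it defaults to [])
def pvLookup (sample : List (String × List Int)) (k : String) : List Int :=
  ((sample.find? (fun p => p.1 == k)).map Prod.snd).getD []

-- ===== PORT A =====
-- the flushed record: pad_len may be negative in Python ([x] * negative = []), hence .toNat
def aRecord (max_seq_len eos_token_id : Int) (current_ids current_labels : List Int) : List (String × List Int) :=
  let pad_len : Int := max_seq_len - current_ids.length
  [("input_ids", current_ids ++ List.replicate pad_len.toNat eos_token_id),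
   ("attention_mask", List.replicate current_ids.length (1 : Int) ++ List.replicate pad_len.toNat (0 : Int)),
   ("labels", current_labels ++ List.replicate pad_len.toNat (-100 : Int))]

def aStep (max_seq_len eos_token_id : Int)
    (st : List (List (String × List Int)) × List Int × List Int)
    (sample : List (String × List Int)) :
    List (List (String × List Int)) × List Int × List Int :=
  let ids := pvLookup sample "input_ids"
  let labels := pvLookup sample "labels"
  let st1 :=
    if st.2.1 ≠ [] ∧ (st.2.1.length : Int) + ids.length + 1 > max_seq_len then
      (st.1 ++ [aRecord max_seq_len eos_token_id st.2.1 st.2.2], ([] : List Int), ([] : List Int))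
    else st
  let st2 :=
    if st1.2.1 ≠ [] then (st1.1, st1.2.1 ++ [eos_token_id], st1.2.2 ++ [(-100 : Int)])
    else st1
  (st2.1, st2.2.1 ++ ids, st2.2.2 ++ labels)

def pack_sequences (tokenized_samples : List (List (String × List Int))) (max_seq_len : Int) (eos_token_id : Int) : List (List (String × List Int)) :=
  let st := tokenized_samples.foldl (aStep max_seq_len eos_token_id) ([], [], [])
  if st.2.1 ≠ [] then st.1 ++ [aRecord max_seq_len eos_token_id st.2.1 st.2.2]
  else st.1

-- ===== PORT B =====
-- pass 1 step: close the current group when the running length would overflow, then add the sample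
def bGroupStep (max_seq_len : Int)
    (st : List (List (List (String × List Int))) × List (List (String × List Int)) × Int)
    (sample : List (String × List Int)) :
    List (List (List (String × List Int))) × List (List (String × List Int)) × Int :=
  let n : Int := (pvLookup sample "input_ids").length
  let st1 :=
    if st.2.2 > 0 ∧ st.2.2 + n + 1 > max_seq_len then (st.1 ++ [st.2.1], ([] : List (List (String × List Int))), (0 : Int))
    else st
  (st1.1, st1.2.1 ++ [sample], st1.2.2 + n + (if st1.2.2 > 0 then 1 else 0))

-- pass 2: join one group's samples with EOS / -100 separators
def bJoinStep (eos_token_id : Int) (acc : List Int × List Int) (sample : List (String × List Int)) : List Int × List Int :=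
  let acc1 := if acc.1 ≠ [] then (acc.1 ++ [eos_token_id], acc.2 ++ [(-100 : Int)]) else acc
  (acc1.1 ++ pvLookup sample "input_ids", acc1.2 ++ pvLookup sample "labels")

def bRender (eos_token_id : Int) (group : List (List (String × List Int))) : List Int × List Int :=
  group.foldl (bJoinStep eos_token_id) ([], [])

def bRecord (max_seq_len eos_token_id : Int) (ids labels : List Int) : List (String × List Int) :=
  let pad : Int := max (max_seq_len - ids.length) 0
  [("input_ids", ids ++ List.replicate pad.toNat eos_token_id),
   ("attention_mask", List.replicate ids.length (1 : Int) ++ List.replicate pad.toNat (0 : Int)),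
   ("labels", labels ++ List.replicate pad.toNat (-100 : Int))]

def bEmit (max_seq_len eos_token_id : Int) (packed : List (List (String × List Int))) (group : List (List (String × List Int))) : List (List (String × List Int)) :=
  let r := bRender eos_token_id group
  if r.1 = [] then packed
  else packed ++ [bRecord max_seq_len eos_token_id r.1 r.2]

def pack_sequences_alt (tokenized_samples : List (List (String × List Int))) (max_seq_len : Int) (eos_token_id : Int) : List (List (String × List Int)) :=
  let g := tokenized_samples.foldl (bGroupStep max_seq_len) ([], [], 0)
  (g.1 ++ [g.2.1]).foldl (bEmit max_seq_len eos_token_id) []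

-- ===== PRECONDITION & SPEC =====
-- Pre_ excludes samples missing an "input_ids" or "labels" key, on which Python A raises KeyError.
def Pre_pack_sequences (tokenized_samples : List (List (String × List Int))) (max_seq_len : Int) (eos_token_id : Int) : Prop :=
  ∀ s ∈ tokenized_samples, "input_ids" ∈ s.map Prod.fst ∧ "labels" ∈ s.map Prod.fst
instance (tokenized_samples : List (List (String × List Int))) (max_seq_len : Int) (eos_token_id : Int) : Decidable (Pre_pack_sequences tokenized_samples max_seq_len eos_token_id) := by unfold Pre_pack_sequences; infer_instance

def pvWitness_pack_sequences : (List (List (String × List Int))) × Int × Int :=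
  ([[("input_ids", [1, 2]), ("labels", [3, 4])], [("input_ids", [5]), ("labels", [6])]], 4, 0)

def Spec_pack_sequences (tokenized_samples : List (List (String × List Int))) (max_seq_len : Int) (eos_token_id : Int) (out : List (List (String × List Int))) : Prop := out = pack_sequences_alt tokenized_samples max_seq_len eos_token_id
instance (tokenized_samples : List (List (String × List Int))) (max_seq_len : Int) (eos_token_id : Int) (out : List (List (String × List Int))) : Decidable (Spec_pack_sequences tokenized_samples max_seq_len eos_token_id out) := by unfold Spec_pack_sequences; infer_instance

-- ===== CLAIM (what is proved, stated in full; the proofs are below) =====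
def Claim_equal_pack_sequences : Prop := ∀ (tokenized_samples : List (List (String × List Int))) (max_seq_len : Int) (eos_token_id : Int), Dom_pack_sequences tokenized_samples max_seq_len eos_token_id → Pre_pack_sequences tokenized_samples max_seq_len eos_token_id → Spec_pack_sequences tokenized_samples max_seq_len eos_token_id (pack_sequences tokenized_samples max_seq_len eos_token_id)

-- ===== LEMMAS AND PROOFS =====

-- the two record builders agree: max(pad, 0).toNat = pad.toNat
lemma record_eq (max_seq_len eos_token_id : Int) (ids labels : List Int) :
    bRecord max_seq_len eos_token_id ids labels = aRecord max_seq_len eos_token_id ids labels := by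
  have h : (max (max_seq_len - (ids.length : Int)) 0).toNat = (max_seq_len - (ids.length : Int)).toNat := by omega
  simp [bRecord, aRecord, h]

lemma bRender_append (eos_token_id : Int) (group : List (List (String × List Int))) (s : List (String × List Int)) :
    bRender eos_token_id (group ++ [s]) = bJoinStep eos_token_id (bRender eos_token_id group) s := by
  simp [bRender, List.foldl_append]

-- emitting a group whose rendered ids are nonempty appends the corresponding record
lemma bEmit_nonempty (max_seq_len eos_token_id : Int) (packed group) (h : (bRender eos_token_id group).1 ≠ []) :
    bEmit max_seq_len eos_token_id packed group
      = packed ++ [bRecord max_seq_len eos_token_id (bRender eos_token_id group).1 (bRender eos_token_id group).2] := by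
  simp [bEmit, h]

-- one step of A's loop, written out
lemma aStep_eq (m e : Int) (st : List (List (String × List Int)) × List Int × List Int)
    (s : List (String × List Int)) :
    aStep m e st s =
      if st.2.1 ≠ [] ∧ (st.2.1.length : Int) + ((pvLookup s "input_ids").length : Int) + 1 > m then
        (st.1 ++ [aRecord m e st.2.1 st.2.2], pvLookup s "input_ids", pvLookup s "labels")
      else if st.2.1 ≠ [] then
        (st.1, st.2.1 ++ [e] ++ pvLookup s "input_ids", st.2.2 ++ [(-100 : Int)] ++ pvLookup s "labels")
      else
        (st.1, st.2.1 ++ pvLookup s "input_ids", st.2.2 ++ pvLookup s "labels") := by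
  unfold aStep
  simp only []
  by_cases h1 : st.2.1 ≠ [] ∧ (st.2.1.length : Int) + ((pvLookup s "input_ids").length : Int) + 1 > m
  · rw [if_pos h1, if_pos h1]
    simp
  · rw [if_neg h1, if_neg h1]
    by_cases h2 : st.2.1 ≠ []
    · rw [if_pos h2, if_pos h2]
    · rw [if_neg h2, if_neg h2]

-- one step of B's grouping pass, written out
lemma bGroupStep_eq (m : Int) (st : List (List (List (String × List Int))) × List (List (String × List Int)) × Int)
    (s : List (String × List Int)) :
    bGroupStep m st s =
      if st.2.2 > 0 ∧ st.2.2 + ((pvLookup s "input_ids").length : Int) + 1 > m then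
        (st.1 ++ [st.2.1], [s], ((pvLookup s "input_ids").length : Int))
      else
        (st.1, st.2.1 ++ [s], st.2.2 + ((pvLookup s "input_ids").length : Int) + if st.2.2 > 0 then 1 else 0) := by
  unfold bGroupStep
  simp only []
  by_cases h : st.2.2 > 0 ∧ st.2.2 + ((pvLookup s "input_ids").length : Int) + 1 > m
  · rw [if_pos h, if_pos h]
    simp
  · rw [if_neg h, if_neg h]

-- one step of B's join, written out
lemma bJoinStep_eq (e : Int) (acc : List Int × List Int) (s : List (String × List Int)) :
    bJoinStep e acc s =
      if acc.1 ≠ [] then (acc.1 ++ [e] ++ pvLookup s "input_ids", acc.2 ++ [(-100 : Int)] ++ pvLookup s "labels")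
      else (acc.1 ++ pvLookup s "input_ids", acc.2 ++ pvLookup s "labels") := by
  unfold bJoinStep
  simp only []
  by_cases h : acc.1 ≠ []
  · rw [if_pos h, if_pos h]
  · rw [if_neg h, if_neg h]

-- B's pass-1 bins accumulator only ever appends: shift the initial bins out front
lemma bGroup_shift (m : Int) (ts : List (List (String × List Int))) :
    ∀ (bins : List (List (List (String × List Int)))) (cur : List (List (String × List Int))) (run : Int),
      ts.foldl (bGroupStep m) (bins, cur, run)
        = (bins ++ (ts.foldl (bGroupStep m) ([], cur, run)).1, (ts.foldl (bGroupStep m) ([], cur, run)).2) := by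
  induction ts with
  | nil => intro bins cur run; simp
  | cons s ts ih =>
    intro bins cur run
    rw [List.foldl_cons, List.foldl_cons, bGroupStep_eq m (bins, cur, run) s, bGroupStep_eq m ([], cur, run) s]
    by_cases h : run > 0 ∧ run + ((pvLookup s "input_ids").length : Int) + 1 > m
    · rw [if_pos h, if_pos h]
      rw [ih (bins ++ [cur]), ih ([] ++ [cur])]
      simp
    · rw [if_neg h, if_neg h]
      rw [ih bins, ih []]


-- MAIN LOOP INVARIANT: running A's loop from a state whose (ids, labels) pair is the rendering of
-- the open group `cur` (with B's running counter = the rendered ids length) yields, in order, the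
-- records B emits for the groups B's pass 1 closes.
lemma loop_invariant (m e : Int) (ts : List (List (String × List Int))) :
    ∀ (packed : List (List (String × List Int))) (cur : List (List (String × List Int))),
      ts.foldl (aStep m e) (packed, bRender e cur)
        = ((ts.foldl (bGroupStep m) ([], cur, ((bRender e cur).1.length : Int))).1.foldl (bEmit m e) packed,
           bRender e (ts.foldl (bGroupStep m) ([], cur, ((bRender e cur).1.length : Int))).2.1) := by
  induction ts with
  | nil => intro packed cur; simp
  | cons s ts ih =>
    intro packed cur
    rw [List.foldl_cons, List.foldl_cons,
        aStep_eq m e (packed, bRender e cur) s,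
        bGroupStep_eq m ([], cur, ((bRender e cur).1.length : Int)) s]
    by_cases hne : (bRender e cur).1 = []
    · -- open group renders empty ids: no flush, no separator
      have hrun0 : ((bRender e cur).1.length : Int) = 0 := by rw [hne]; rfl
      have h1 : ¬ ((packed, bRender e cur).2.1 ≠ [] ∧
          (((packed, bRender e cur).2.1.length : Int) + ((pvLookup s "input_ids").length : Int) + 1 > m)) := by
        intro h; exact h.1 hne
      have h2 : ¬ (((([] : List (List (List (String × List Int)))), cur, ((bRender e cur).1.length : Int)).2.2 > 0) ∧
          ((([] : List (List (List (String × List Int)))), cur, ((bRender e cur).1.length : Int)).2.2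
            + ((pvLookup s "input_ids").length : Int) + 1 > m)) := by
        intro h; have := h.1; simp only [hrun0] at this; omega
      rw [if_neg h1, if_neg (show ¬ ((packed, bRender e cur).2.1 ≠ []) from not_not_intro hne), if_neg h2]
      have hjoin : bRender e (cur ++ [s])
          = ((bRender e cur).1 ++ pvLookup s "input_ids", (bRender e cur).2 ++ pvLookup s "labels") := by
        rw [bRender_append, bJoinStep_eq, if_neg (not_not_intro hne)]
      have hlen : (((bRender e cur).1.length : Int) + ((pvLookup s "input_ids").length : Int)
            + if ((bRender e cur).1.length : Int) > 0 then 1 else 0)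
          = ((bRender e (cur ++ [s])).1.length : Int) := by
        rw [hjoin, hrun0]
        have h0 : ¬ ((0 : Int) > 0) := by omega
        simp [hne]
      have := ih packed (cur ++ [s])
      rw [hjoin] at this
      simp only [] at this ⊢
      rw [hlen]
      rw [hjoin]
      exact this
    · by_cases hov : ((bRender e cur).1.length : Int) + ((pvLookup s "input_ids").length : Int) + 1 > m
      · -- flush: A emits the record, B closes the group
        have hpos : ((bRender e cur).1.length : Int) > 0 := by
          have := List.length_pos_iff.mpr hne; omega
        rw [if_pos (show (packed, bRender e cur).2.1 ≠ [] ∧ _ from ⟨hne, hov⟩), if_pos ⟨hpos, hov⟩]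
        have hjoin : bRender e [s] = (pvLookup s "input_ids", pvLookup s "labels") := by
          rw [show ([s] : List (List (String × List Int))) = [] ++ [s] from rfl, bRender_append,
              bJoinStep_eq]
          rfl
        have hlen : ((pvLookup s "input_ids").length : Int) = ((bRender e [s]).1.length : Int) := by
          rw [hjoin]
        have hst : (pvLookup s "input_ids", pvLookup s "labels") = bRender e [s] := hjoin.symm
        rw [bGroup_shift m ts ([] ++ [cur])]
        have := ih (packed ++ [aRecord m e (bRender e cur).1 (bRender e cur).2]) [s]
        simp only [] at this ⊢
        rw [hlen, hst, this]
        have hemit : bEmit m e packed cur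
            = packed ++ [aRecord m e (bRender e cur).1 (bRender e cur).2] := by
          rw [bEmit_nonempty m e packed cur hne, record_eq]
        simp [hemit]
      · -- fits: A appends separator + sample, B extends the group
        have hpos : ((bRender e cur).1.length : Int) > 0 := by
          have := List.length_pos_iff.mpr hne; omega
        rw [if_neg (show ¬ ((packed, bRender e cur).2.1 ≠ [] ∧ _) from fun h => hov h.2),
            if_pos (show (packed, bRender e cur).2.1 ≠ [] from hne),
            if_neg (show ¬ (_ ∧ _) from fun h => hov h.2)]
        have hjoin : bRender e (cur ++ [s])
            = ((bRender e cur).1 ++ [e] ++ pvLookup s "input_ids",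
               (bRender e cur).2 ++ [(-100 : Int)] ++ pvLookup s "labels") := by
          rw [bRender_append, bJoinStep_eq, if_pos hne]
        have hlen : (((bRender e cur).1.length : Int) + ((pvLookup s "input_ids").length : Int)
              + if ((bRender e cur).1.length : Int) > 0 then 1 else 0)
            = ((bRender e (cur ++ [s])).1.length : Int) := by
          rw [hjoin, if_pos hpos]
          simp
          omega
        have := ih packed (cur ++ [s])
        rw [hjoin] at this
        simp only [] at this ⊢
        rw [hlen, hjoin]
        exact this

theorem pack_sequences_spec : Claim_equal_pack_sequences := by
  intro ts m e _ _
  unfold Spec_pack_sequences pack_sequences pack_sequences_alt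
  have h := loop_invariant m e ts [] []
  have hr : bRender e ([] : List (List (String × List Int))) = ([], []) := rfl
  rw [hr] at h
  simp only [List.length_nil, Nat.cast_zero] at h
  rw [h]
  rw [List.foldl_append, List.foldl_cons, List.foldl_nil]
  by_cases hc : (bRender e (ts.foldl (bGroupStep m) ([], [], 0)).2.1).1 = []
  · simp [bEmit, hc]
  · rw [bEmit_nonempty m e _ _ hc, record_eq]
    simp [hc]
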